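-- pv_equiv track=rewrite | github.com/phueb/BabyBertSRL | babybertsrl/word_pieces.py | convert_bio_tags_to_wordpieces
-- ===== SOURCE A (Python) =====
-- from typing import List, Tuple
--
-- def convert_bio_tags_to_wordpieces(tags: List[str],
--                                    offsets: List[int],
--                                    ) -> List[str]:
--     """
--     Converts a series of BIO tags to account for a wordpiece tokenizer,
--     extending/modifying BIO tags where appropriate to deal with words which
--     are split into multiple wordpieces by the tokenizer.
--
--     Parameters
--     ----------
--     tags : `List[str]`
--         The BIO formatted tags to convert to BIO tags for wordpieces
--     offsets : `List[int]`
--         The wordpiece offsets.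
--
--     Returns
--     -------
--     The new BIO tags.
--     """
--     new_tags = []
--     j = 0
--     for i, offset in enumerate(offsets):
--         tag = tags[i]
--         is_o = tag == "O"
--         is_start = True
--         while j < offset:
--             if is_o:
--                 new_tags.append("O")
--
--             elif tag.startswith("I"):
--                 new_tags.append(tag)
--
--             elif is_start and tag.startswith("B"):
--                 new_tags.append(tag)
--                 is_start = False
--
--             elif tag.startswith("B"):
--                 _, label = tag.split("-", 1)
--                 new_tags.append("I-" + label)
--             j += 1
--
--     # Add O tags for cls and sep tokens.
--     return ['O'] + new_tags + ['O']
-- ===== SOURCE B (Python) =====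
-- def convert_bio_tags_to_wordpieces(tags, offsets):
--     # Two staged passes instead of A's nested word/wordpiece loop: pass 1 builds a
--     # boundary map {wordpiece start position -> starting word's tag} via a running
--     # max; pass 2 iterates over wordpiece POSITIONS, switching tag state at
--     # boundaries and emitting one tag per position.
--     starts = {}
--     m = 0
--     for tag, offset in zip(tags, offsets):
--         if offset > m:
--             starts[m] = tag
--             m = offset
--     new_tags = []
--     cur = None
--     for p in range(m):
--         first = p in starts
--         if first:
--             cur = starts[p]
--         if cur == "O":
--             new_tags.append("O")
--         elif cur.startswith("I"):
--             new_tags.append(cur)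
--         elif cur.startswith("B"):
--             if first:
--                 new_tags.append(cur)
--             else:
--                 _, label = cur.split("-", 1)
--                 new_tags.append("I-" + label)
--     return ["O"] + new_tags + ["O"]
-- ===== Notes on version B (the rewrite author's own statement) =====
-- stated objective: alternative
-- what changed: Replaces A's nested word/wordpiece state-machine loop by two staged passes: first build a dict mapping wordpiece start positions to the starting word's tag via a running max, then iterate over wordpiece positions, switching tag state at boundaries and emitting one tag per position.
import Mathlib
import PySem

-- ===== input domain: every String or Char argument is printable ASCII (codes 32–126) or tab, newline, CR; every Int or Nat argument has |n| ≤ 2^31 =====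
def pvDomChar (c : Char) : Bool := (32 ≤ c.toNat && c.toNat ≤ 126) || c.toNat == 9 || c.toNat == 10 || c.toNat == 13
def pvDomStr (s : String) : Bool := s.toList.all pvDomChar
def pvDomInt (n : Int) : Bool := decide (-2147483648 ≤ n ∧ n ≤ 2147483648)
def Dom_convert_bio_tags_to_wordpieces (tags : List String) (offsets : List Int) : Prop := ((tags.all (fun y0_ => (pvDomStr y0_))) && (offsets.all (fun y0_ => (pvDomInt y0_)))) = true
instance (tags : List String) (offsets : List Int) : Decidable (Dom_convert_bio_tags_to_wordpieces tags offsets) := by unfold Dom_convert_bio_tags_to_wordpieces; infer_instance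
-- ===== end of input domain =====

-- B replaces A's nested word/wordpiece state-machine loop by two staged passes — a
-- boundary dict (wordpiece start position -> starting word's tag, via a running max),
-- then a loop over wordpiece positions switching tag state at boundaries; objective: alternative.

-- label = tag.split("-", 1)[1]; Python raises ValueError when there is no "-"
-- (those inputs are outside Pre_); the "" default is never reached inside Pre_.
def pySplitLabel (tag : String) : String :=
  match PySem.Str.splitMax? tag "-" 1 with
  | some (_ :: label :: _) => label
  | _ => ""

-- ===== PORT A =====
-- the inner `while j < offset` loop of A, carrying (is_start, new_tags, j)
def innerA (tag : String) (offset j : Int) (isStart : Bool) (acc : List String) :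
    List String × Int :=
  if _h : j < offset then
    if tag == "O" then innerA tag offset (j + 1) isStart (acc ++ ["O"])
    else if PySem.Str.startswith tag "I" then innerA tag offset (j + 1) isStart (acc ++ [tag])
    else if isStart && PySem.Str.startswith tag "B" then innerA tag offset (j + 1) false (acc ++ [tag])
    else if PySem.Str.startswith tag "B" then
      innerA tag offset (j + 1) isStart (acc ++ ["I-" ++ pySplitLabel tag])
    else innerA tag offset (j + 1) isStart acc
  else (acc, j)
termination_by (offset - j).toNat
decreasing_by all_goals omega

-- the outer `for i, offset in enumerate(offsets)` loop of A
def outerA (tags : List String) (i : Nat) (offsets : List Int) (j : Int) (acc : List String) :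
    List String :=
  match offsets with
  | [] => acc
  | offset :: rest =>
    -- tag = tags[i]; IndexError (pyGet? = none) is excluded by Pre_
    let tag := (PySem.List.pyGet? tags (i : Int)).getD ""
    let p := innerA tag offset j true acc
    outerA tags (i + 1) rest p.2 p.1

def convert_bio_tags_to_wordpieces (tags : List String) (offsets : List Int) : List String :=
  ["O"] ++ outerA tags 0 offsets 0 [] ++ ["O"]

-- ===== PORT B =====
-- pass 1 of Source B: `for tag, offset in zip(tags, offsets): if offset > m: starts[m] = tag; m = offset`
def buildStarts (ws : List (String × Int)) (starts : PySem.Dict Int String) (m : Int) :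
    PySem.Dict Int String × Int :=
  match ws with
  | [] => (starts, m)
  | (tag, offset) :: rest =>
    if offset > m then buildStarts rest (starts.insert m tag) offset
    else buildStarts rest starts m

-- pass 2 of Source B: `for p in range(m): first = p in starts; if first: cur = starts[p]; …`
-- (cur : Option String mirrors Python's `cur = None` initialisation; the `none` arm emits
-- nothing: there Python's `cur == "O"` is False and `cur.startswith` would raise
-- AttributeError, unreachable because position 0 is always a boundary)
def fillLoop (D : PySem.Dict Int String) : List Int → Option String → List String →
    Option String × List String
  | [], cur, acc => (cur, acc)
  | p :: rest, cur, acc =>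
    match D.get? p with
    | some t =>  -- first = True, cur = starts[p]
      if t == "O" then fillLoop D rest (some t) (acc ++ ["O"])
      else if PySem.Str.startswith t "I" then fillLoop D rest (some t) (acc ++ [t])
      else if PySem.Str.startswith t "B" then fillLoop D rest (some t) (acc ++ [t])
      else fillLoop D rest (some t) acc
    | none =>    -- first = False
      match cur with
      | some t =>
        if t == "O" then fillLoop D rest cur (acc ++ ["O"])
        else if PySem.Str.startswith t "I" then fillLoop D rest cur (acc ++ [t])
        else if PySem.Str.startswith t "B" then
          fillLoop D rest cur (acc ++ ["I-" ++ pySplitLabel t])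
        else fillLoop D rest cur acc
      | none => fillLoop D rest cur acc

def convert_bio_tags_to_wordpieces_alt (tags : List String) (offsets : List Int) : List String :=
  ["O"] ++ (fillLoop (buildStarts (tags.zip offsets) PySem.Dict.empty 0).1
      (PySem.List.pyRange 0 (buildStarts (tags.zip offsets) PySem.Dict.empty 0).2 1)
      none []).2 ++ ["O"]

-- ===== PRECONDITION & SPEC =====
-- Pre_ is exactly A's return domain: A raises IndexError when offsets is longer than tags
-- (it reads tags[i] for every i), and ValueError when a tag starting with "B" but containing
-- no "-" needs a second wordpiece (offsets[i] exceeds the running max of earlier offsets by ≥ 2).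
def Pre_convert_bio_tags_to_wordpieces (tags : List String) (offsets : List Int) : Prop :=
  offsets.length ≤ tags.length ∧
  ∀ i, i < offsets.length →
    (PySem.Str.startswith (tags.getD i "") "B" = true ∧
     PySem.Str.isIn "-" (tags.getD i "") = false) →
    offsets.getD i 0 ≤ ((offsets.take i).foldl max 0) + 1

instance (tags : List String) (offsets : List Int) :
    Decidable (Pre_convert_bio_tags_to_wordpieces tags offsets) := by
  unfold Pre_convert_bio_tags_to_wordpieces; infer_instance

def pvWitness_convert_bio_tags_to_wordpieces : List String × List Int :=
  (["B-ARG0", "I-ARG0", "O"], [2, 4, 5])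

def Spec_convert_bio_tags_to_wordpieces (tags : List String) (offsets : List Int) (out : List String) : Prop := out = convert_bio_tags_to_wordpieces_alt tags offsets
instance (tags : List String) (offsets : List Int) (out : List String) : Decidable (Spec_convert_bio_tags_to_wordpieces tags offsets out) := by unfold Spec_convert_bio_tags_to_wordpieces; infer_instance

-- ===== CLAIM (what is proved, stated in full; the proofs are below) =====
def Claim_equal_convert_bio_tags_to_wordpieces : Prop := ∀ (tags : List String) (offsets : List Int), Dom_convert_bio_tags_to_wordpieces tags offsets → Pre_convert_bio_tags_to_wordpieces tags offsets → Spec_convert_bio_tags_to_wordpieces tags offsets (convert_bio_tags_to_wordpieces tags offsets)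

-- ===== LEMMAS AND PROOFS =====

-- what A's inner loop emits for one word: `n` remaining wordpieces, is_start flag
def emitGen (tag : String) (isStart : Bool) (n : Nat) : List String :=
  if tag == "O" then List.replicate n "O"
  else if PySem.Str.startswith tag "I" then List.replicate n tag
  else if PySem.Str.startswith tag "B" then
    (if isStart then
       (match n with
        | 0 => []
        | m + 1 => tag :: List.replicate m ("I-" ++ pySplitLabel tag))
     else List.replicate n ("I-" ++ pySplitLabel tag))
  else []

-- the wordpiece tags for a whole tag/offset list from cursor m (common normal form)
def blocksA : List (String × Int) → Int → List String
  | [], _ => []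
  | (tag, offset) :: rest, m =>
    emitGen tag true (offset - m).toNat ++ blocksA rest (if offset > m then offset else m)

-- the final running max (= total number of wordpieces when started at 0)
def finalMax : List (String × Int) → Int → Int
  | [], m => m
  | (_, offset) :: rest, m => if offset > m then finalMax rest offset else finalMax rest m

-- lookup in the boundary map Source B builds, as a function of the word list and cursor
def lookupStarts : List (String × Int) → Int → Int → Option String
  | [], _, _ => none
  | (tag, offset) :: rest, m, p =>
    if offset > m then (if p = m then some tag else lookupStarts rest offset p)
    else lookupStarts rest m p

-- what one boundary position emits
def headPiece (tag : String) : List String :=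
  if tag == "O" then ["O"]
  else if PySem.Str.startswith tag "I" then [tag]
  else if PySem.Str.startswith tag "B" then [tag]
  else []

-- what n non-boundary positions with state tag emit
def contGen (tag : String) (n : Nat) : List String :=
  if tag == "O" then List.replicate n "O"
  else if PySem.Str.startswith tag "I" then List.replicate n tag
  else if PySem.Str.startswith tag "B" then List.replicate n ("I-" ++ pySplitLabel tag)
  else []

lemma emitGen_zero (tag : String) (isStart : Bool) : emitGen tag isStart 0 = [] := by
  unfold emitGen; split_ifs <;> simp

lemma emitGen_succ_O (tag : String) (isStart : Bool) (n : Nat) (hO : (tag == "O") = true) :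
    emitGen tag isStart (n + 1) = "O" :: emitGen tag isStart n := by
  unfold emitGen; rw [if_pos hO, if_pos hO, List.replicate_succ]

lemma emitGen_succ_I (tag : String) (isStart : Bool) (n : Nat) (hO : ¬ (tag == "O") = true)
    (hI : PySem.Str.startswith tag "I" = true) :
    emitGen tag isStart (n + 1) = tag :: emitGen tag isStart n := by
  unfold emitGen; rw [if_neg hO, if_neg hO, if_pos hI, if_pos hI, List.replicate_succ]

lemma emitGen_succ_B_true (tag : String) (n : Nat) (hO : ¬ (tag == "O") = true)
    (hI : ¬ PySem.Str.startswith tag "I" = true) (hB : PySem.Str.startswith tag "B" = true) :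
    emitGen tag true (n + 1) = tag :: emitGen tag false n := by
  unfold emitGen
  rw [if_neg hO, if_neg hO, if_neg hI, if_neg hI, if_pos hB, if_pos hB,
    if_pos rfl, if_neg (by simp)]

lemma emitGen_succ_B_false (tag : String) (n : Nat) (hO : ¬ (tag == "O") = true)
    (hI : ¬ PySem.Str.startswith tag "I" = true) (hB : PySem.Str.startswith tag "B" = true) :
    emitGen tag false (n + 1) = ("I-" ++ pySplitLabel tag) :: emitGen tag false n := by
  unfold emitGen
  rw [if_neg hO, if_neg hO, if_neg hI, if_neg hI, if_pos hB, if_pos hB,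
    if_neg (by simp), if_neg (by simp), List.replicate_succ]

lemma emitGen_succ_other (tag : String) (isStart : Bool) (n : Nat) (hO : ¬ (tag == "O") = true)
    (hI : ¬ PySem.Str.startswith tag "I" = true) (hB : ¬ PySem.Str.startswith tag "B" = true) :
    emitGen tag isStart (n + 1) = emitGen tag isStart n := by
  unfold emitGen
  rw [if_neg hO, if_neg hO, if_neg hI, if_neg hI, if_neg hB, if_neg hB]

lemma innerA_eq (n : Nat) : ∀ (tag : String) (offset j : Int) (isStart : Bool)
    (acc : List String), (offset - j).toNat = n →
    innerA tag offset j isStart acc =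
      (acc ++ emitGen tag isStart n, if j < offset then offset else j) := by
  induction n with
  | zero =>
    intro tag offset j isStart acc h
    have hlt : ¬ j < offset := by omega
    rw [innerA]
    simp [hlt, emitGen_zero]
  | succ n ih =>
    intro tag offset j isStart acc h
    have hlt : j < offset := by omega
    have h' : (offset - (j + 1)).toNat = n := by omega
    have hj : (if j + 1 < offset then offset else j + 1) = offset := by
      split_ifs <;> omega
    have hacc : ∀ (x : String) (L : List String), (acc ++ [x]) ++ L = acc ++ (x :: L) := by
      intro x L; rw [List.append_assoc]; rfl
    have hBfalse : ∀ s : Bool, ¬ PySem.Str.startswith tag "B" = true →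
        ¬ (s && PySem.Str.startswith tag "B") = true := by
      intro s hB hx
      exact hB (Bool.and_elim_right hx)
    rw [innerA, dif_pos hlt]
    by_cases hO : (tag == "O") = true
    · rw [if_pos hO, ih _ _ _ _ _ h', hj, emitGen_succ_O _ _ _ hO, hacc, if_pos hlt]
    · rw [if_neg hO]
      by_cases hI : PySem.Str.startswith tag "I" = true
      · rw [if_pos hI, ih _ _ _ _ _ h', hj, emitGen_succ_I _ _ _ hO hI, hacc, if_pos hlt]
      · rw [if_neg hI]
        by_cases hB : PySem.Str.startswith tag "B" = true
        · cases isStart with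
          | true =>
            rw [if_pos (by rw [hB]; rfl), ih _ _ _ _ _ h', hj,
              emitGen_succ_B_true _ _ hO hI hB, hacc, if_pos hlt]
          | false =>
            rw [if_neg (by simp), if_pos hB, ih _ _ _ _ _ h', hj,
              emitGen_succ_B_false _ _ hO hI hB, hacc, if_pos hlt]
        · rw [if_neg (hBfalse _ hB), if_neg hB, ih _ _ _ _ _ h', hj,
            emitGen_succ_other _ _ _ hO hI hB, if_pos hlt]

-- A's outer loop computes blocksA of the zipped tail
lemma outerA_blocks (offsets : List Int) : ∀ (tags : List String) (i : Nat) (j : Int)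
    (acc : List String), i + offsets.length ≤ tags.length →
    outerA tags i offsets j acc = acc ++ blocksA ((tags.drop i).zip offsets) j := by
  induction offsets with
  | nil => intro tags i j acc _; simp [outerA, blocksA]
  | cons offset rest ih =>
    intro tags i j acc hlen
    have hi : i < tags.length := by simp at hlen; omega
    have hget : (PySem.List.pyGet? tags (i : Int)).getD "" = tags[i] := by
      simp [PySem.List.pyGet?_natCast, List.getElem?_eq_getElem hi]
    have hdrop : tags.drop i = tags[i] :: tags.drop (i + 1) :=
      List.drop_eq_getElem_cons hi
    rw [outerA]
    simp only [hget]
    rw [innerA_eq ((offset - j).toNat) _ _ _ _ _ rfl,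
      ih tags (i + 1) _ _ (by simp at hlen ⊢; omega), hdrop]
    simp only [List.zip_cons_cons, blocksA, List.append_assoc]

-- ===== B-side characterisation =====

lemma buildStarts_snd (ws : List (String × Int)) : ∀ (d : PySem.Dict Int String) (m : Int),
    (buildStarts ws d m).2 = finalMax ws m := by
  induction ws with
  | nil => intro d m; rfl
  | cons w rest ih =>
    intro d m
    obtain ⟨tag, offset⟩ := w
    rw [buildStarts, finalMax]
    split_ifs with h <;> exact ih _ _

lemma le_finalMax (ws : List (String × Int)) : ∀ m : Int, m ≤ finalMax ws m := by
  induction ws with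
  | nil => intro m; exact le_refl m
  | cons w rest ih =>
    intro m
    obtain ⟨tag, offset⟩ := w
    rw [finalMax]
    split_ifs with h
    · exact le_trans (le_of_lt h) (ih offset)
    · exact ih m

lemma lookupStarts_lt (ws : List (String × Int)) : ∀ (m p : Int), p < m →
    lookupStarts ws m p = none := by
  induction ws with
  | nil => intro m p _; rfl
  | cons w rest ih =>
    intro m p hp
    obtain ⟨tag, offset⟩ := w
    rw [lookupStarts]
    split_ifs with h1 h2
    · omega
    · exact ih _ _ (by omega)
    · exact ih _ _ hp

lemma buildStarts_get? (ws : List (String × Int)) : ∀ (d : PySem.Dict Int String) (m p : Int),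
    (∀ k, d.contains k = true → k < m) →
    (buildStarts ws d m).1.get? p =
      (match lookupStarts ws m p with
       | some t => some t
       | none => d.get? p) := by
  induction ws with
  | nil => intro d m p _; rfl
  | cons w rest ih =>
    intro d m p hd
    obtain ⟨tag, offset⟩ := w
    rw [buildStarts, lookupStarts]
    by_cases h1 : offset > m
    · rw [if_pos h1, if_pos h1]
      have hd' : ∀ k, (d.insert m tag).contains k = true → k < offset := by
        intro k hk
        rw [PySem.Dict.contains_insert] at hk
        rcases Bool.or_eq_true_iff.mp hk with h | h
        · have : k = m := by exact_mod_cast eq_of_beq h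
          omega
        · exact lt_trans (hd k h) h1
      rw [ih _ _ p hd']
      by_cases hp : p = m
      · subst hp
        rw [lookupStarts_lt rest offset p (by omega), if_pos rfl,
          PySem.Dict.get?_insert_self]
      · rw [if_neg hp, PySem.Dict.get?_insert_of_ne _ _ hp]
    · rw [if_neg h1, if_neg h1]
      exact ih _ _ p hd

-- one boundary step of the fill loop
lemma fillLoop_start (D : PySem.Dict Int String) (p : Int) (rest : List Int)
    (cur : Option String) (acc : List String) (t : String) (h : D.get? p = some t) :
    fillLoop D (p :: rest) cur acc = fillLoop D rest (some t) (acc ++ headPiece t) := by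
  simp only [fillLoop, h]
  unfold headPiece
  split_ifs with h1 h2 h3 <;> simp

-- n consecutive non-boundary positions
lemma fillLoop_cont (n : Nat) : ∀ (D : PySem.Dict Int String) (a : Int) (t : String)
    (acc : List String), (∀ p, a ≤ p → p < a + n → D.get? p = none) →
    fillLoop D (PySem.List.pyRange a (a + n) 1) (some t) acc =
      (some t, acc ++ contGen t n) := by
  induction n with
  | zero =>
    intro D a t acc _
    rw [show a + (0 : Nat) = a by omega, PySem.List.pyRange_one_eq_nil (le_refl a)]
    simp only [fillLoop, contGen]
    split_ifs <;> simp
  | succ n ih =>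
    intro D a t acc h
    rw [PySem.List.pyRange_one_cons (by omega : a < a + (n + 1 : Nat))]
    simp only [fillLoop, h a (le_refl a) (by omega)]
    have hrange : a + ((n : Nat) + 1 : Nat) = (a + 1) + (n : Nat) := by push_cast; ring
    have hnext : ∀ p, a + 1 ≤ p → p < (a + 1) + (n : Nat) → D.get? p = none := by
      intro p h1 h2; exact h p (by omega) (by omega)
    have hcont : ∀ x : String, contGen t (n + 1) = x :: contGen t n →
        (acc ++ [x]) ++ contGen t n = acc ++ contGen t (n + 1) := by
      intro x hx; rw [hx, List.append_assoc]; rfl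
    unfold contGen
    split_ifs with h1 h2 h3
    · rw [hrange, ih D (a + 1) t _ hnext]
      simp only [contGen, if_pos h1, List.append_assoc, List.replicate_succ]; rfl
    · rw [hrange, ih D (a + 1) t _ hnext]
      simp only [contGen, if_neg h1, if_pos h2, List.append_assoc, List.replicate_succ]; rfl
    · rw [hrange, ih D (a + 1) t _ hnext]
      simp only [contGen, if_neg h1, if_neg h2, if_pos h3, List.append_assoc,
        List.replicate_succ]; rfl
    · rw [hrange, ih D (a + 1) t _ hnext]
      simp only [contGen, if_neg h1, if_neg h2, if_neg h3]

lemma fillLoop_append (D : PySem.Dict Int String) (l1 : List Int) : ∀ (l2 : List Int)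
    (cur : Option String) (acc : List String),
    fillLoop D (l1 ++ l2) cur acc =
      fillLoop D l2 (fillLoop D l1 cur acc).1 (fillLoop D l1 cur acc).2 := by
  induction l1 with
  | nil => intro l2 cur acc; rfl
  | cons p l ih =>
    intro l2 cur acc
    cases hD : D.get? p with
    | some t =>
      simp only [List.cons_append, fillLoop, hD]
      split_ifs <;> apply ih
    | none =>
      cases cur with
      | some t =>
        simp only [List.cons_append, fillLoop, hD]
        split_ifs <;> apply ih
      | none =>
        simp only [List.cons_append, fillLoop, hD]
        apply ih

-- splitting a word's block into its boundary piece and continuation pieces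
lemma emitGen_split (tag : String) (n : Nat) :
    emitGen tag true (n + 1) = headPiece tag ++ contGen tag n := by
  unfold emitGen headPiece contGen
  split_ifs with h1 h2 h3 <;> simp_all [List.replicate_succ]

-- the fill loop over [m, finalMax) with the boundary lookups of `ws` computes blocksA
lemma fillLoop_blocks (ws : List (String × Int)) : ∀ (m : Int) (D : PySem.Dict Int String)
    (cur : Option String) (acc : List String),
    (∀ p, m ≤ p → p < finalMax ws m → D.get? p = lookupStarts ws m p) →
    (fillLoop D (PySem.List.pyRange m (finalMax ws m) 1) cur acc).2 = acc ++ blocksA ws m := by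
  induction ws with
  | nil =>
    intro m D cur acc _
    rw [finalMax, PySem.List.pyRange_one_eq_nil (le_refl m)]
    simp [fillLoop, blocksA]
  | cons w rest ih =>
    intro m D cur acc hD
    obtain ⟨tag, offset⟩ := w
    by_cases h1 : offset > m
    · have hF : finalMax ((tag, offset) :: rest) m = finalMax rest offset := by
        rw [finalMax, if_pos h1]
      have hoffF : offset ≤ finalMax rest offset := le_finalMax rest offset
      rw [hF, PySem.List.pyRange_one_append m offset _ (by omega) hoffF,
        fillLoop_append, PySem.List.pyRange_one_cons h1,
        fillLoop_start D m _ cur acc tag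
          (by rw [hD m (le_refl m) (by rw [hF]; omega), lookupStarts, if_pos h1, if_pos rfl])]
      have hn : offset = (m + 1) + ((offset - (m + 1)).toNat : Nat) := by omega
      have hcont : ∀ p, m + 1 ≤ p → p < (m + 1) + ((offset - (m + 1)).toNat : Nat) →
          D.get? p = none := by
        intro p hp1 hp2
        rw [hD p (by omega) (by rw [hF]; omega), lookupStarts, if_pos h1,
          if_neg (by omega : ¬ p = m)]
        exact lookupStarts_lt rest offset p (by omega)
      rw [show PySem.List.pyRange (m + 1) offset 1
            = PySem.List.pyRange (m + 1) ((m + 1) + ((offset - (m + 1)).toNat : Nat)) 1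
          by rw [← hn],
        fillLoop_cont _ D (m + 1) tag _ hcont]
      have hrest : ∀ p, offset ≤ p → p < finalMax rest offset →
          D.get? p = lookupStarts rest offset p := by
        intro p hp1 hp2
        rw [hD p (by omega) (by rw [hF]; omega), lookupStarts, if_pos h1,
          if_neg (by omega : ¬ p = m)]
      rw [ih offset D (some tag) _ hrest, blocksA, if_pos h1,
        show (offset - m).toNat = (offset - (m + 1)).toNat + 1 by omega,
        emitGen_split]
      simp [List.append_assoc]
    · have hF : finalMax ((tag, offset) :: rest) m = finalMax rest m := by
        rw [finalMax, if_neg h1]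
      have hlk : ∀ p, lookupStarts ((tag, offset) :: rest) m p = lookupStarts rest m p := by
        intro p; rw [lookupStarts, if_neg h1]
      rw [hF, ih m D cur acc (by intro p hp1 hp2; rw [hD p hp1 (by rw [hF]; omega), hlk]),
        blocksA, if_neg h1, show (offset - m).toNat = 0 by omega, emitGen_zero,
        List.nil_append]

-- ===== VERDICT (by name: the statement is the Claim_ definition above) =====
theorem convert_bio_tags_to_wordpieces_spec : Claim_equal_convert_bio_tags_to_wordpieces := by
  intro tags offsets _ hpre
  unfold Spec_convert_bio_tags_to_wordpieces
  unfold convert_bio_tags_to_wordpieces convert_bio_tags_to_wordpieces_alt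
  rw [outerA_blocks offsets tags 0 0 [] (by simpa using hpre.1)]
  rw [buildStarts_snd]
  rw [fillLoop_blocks (tags.zip offsets) 0 _ none []
    (by
      intro p hp1 hp2
      rw [buildStarts_get? (tags.zip offsets) PySem.Dict.empty 0 p
        (by intro k hk; rw [PySem.Dict.contains_empty] at hk; exact absurd hk (by simp))]
      cases lookupStarts (tags.zip offsets) 0 p with
      | some t => rfl
      | none => simp [PySem.Dict.get?_empty])]
  simp
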